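-- pv_equiv track=rewrite | github.com/projeto-de-algoritmos/Greed_Exercicios_Dupla3 | exercicios_resolvidos/guerra.py | number_battles_noglonia_win_in_war
-- ===== SOURCE A (Python) =====
-- def sort_armys(Q, N):
--     Q.sort()
--     N.sort()
--
-- def number_battles_noglonia_win_in_war(S, Q, N):
--     sort_armys(Q, N)
--
--     qi = ni = victories = 0
--
--     while ni < S and qi < S:
--         if N[ni] > Q[qi]:
--             victories += 1
--             qi += 1
--         ni += 1
--
--     return victories
-- ===== SOURCE B (Python) =====
-- def number_battles_noglonia_win_in_war(S, Q, N):
--     Q.sort()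
--     N.sort()
--
--     victories = 0
--     available = 0
--     qi = 0
--     ni = 0
--
--     while ni < S:
--         while qi < S and Q[qi] < N[ni]:
--             available += 1
--             qi += 1
--         if available > 0:
--             victories += 1
--             available -= 1
--         ni += 1
--
--     return victories
-- ===== Notes on version B (the rewrite author's own statement) =====
-- stated objective: alternative
-- what changed: B replaces A's pair-matching two-pointer by a pool-counter sweep: an inner loop moves every Quar army weaker than the current Noglonia army into an availability pool, and a win is taken from the pool, instead of A's comparison of the two current pointers that advances qi only on a win.
-- outside the precondition, e.g. on number_battles_noglonia_win_in_war(3, [0, 1], [2, 0, 0]): A returns 1, B raises IndexError; on number_battles_noglonia_win_in_war(2, [5], [0, 0]): A returns 0, B returns 0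
import Mathlib
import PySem

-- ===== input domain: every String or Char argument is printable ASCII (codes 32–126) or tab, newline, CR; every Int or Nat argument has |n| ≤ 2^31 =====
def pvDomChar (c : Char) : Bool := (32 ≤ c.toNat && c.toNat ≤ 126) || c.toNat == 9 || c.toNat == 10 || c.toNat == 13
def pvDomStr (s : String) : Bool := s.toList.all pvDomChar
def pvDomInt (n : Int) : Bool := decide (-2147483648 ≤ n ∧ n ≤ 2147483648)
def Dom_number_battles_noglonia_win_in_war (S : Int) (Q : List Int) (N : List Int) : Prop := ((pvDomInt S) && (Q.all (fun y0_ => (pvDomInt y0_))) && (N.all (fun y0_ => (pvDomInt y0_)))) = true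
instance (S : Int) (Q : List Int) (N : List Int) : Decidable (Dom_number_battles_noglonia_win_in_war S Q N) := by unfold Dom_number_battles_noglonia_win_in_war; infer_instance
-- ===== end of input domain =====

-- B replaces A's pair-matching two-pointer by a pool-counter sweep (inner loop pours weaker
-- Quar armies into an availability pool, wins are taken from the pool); both A and B sort Q
-- and N in place, and the equivalence proved here is about the return value (the mutation of
-- Q and N is identical).

-- ===== PORT A =====
-- the while loop of A: ni/qi walk upward, N[ni]/Q[qi] read with Python indexing
def loopA (S : Int) (Q N : List Int) (ni qi v : Int) : Int :=
  if _h : ni < S ∧ qi < S then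
    match PySem.List.pyGet? N ni, PySem.List.pyGet? Q qi with
    | some nv, some qv =>
        if nv > qv then loopA S Q N (ni + 1) (qi + 1) (v + 1)
        else loopA S Q N (ni + 1) qi v
    | _, _ => v          -- IndexError in Python; unreachable under Pre_
  else v
termination_by (S - ni).toNat
decreasing_by all_goals omega

def number_battles_noglonia_win_in_war (S : Int) (Q : List Int) (N : List Int) : Int :=
  -- sort_armys(Q, N): Q.sort(); N.sort()
  loopA S (PySem.List.sorted Q (fun x => x) false) (PySem.List.sorted N (fun x => x) false) 0 0 0

-- ===== PORT B =====
-- B's inner while loop: pour Quar armies weaker than nv into the pool; none = IndexError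
def loopBinner (S : Int) (Q : List Int) (nv : Int) (qi avail : Int) : Option (Int × Int) :=
  if _h : qi < S then
    match PySem.List.pyGet? Q qi with
    | some qv =>
        if qv < nv then loopBinner S Q nv (qi + 1) (avail + 1)
        else some (qi, avail)
    | none => none       -- IndexError in Python; unreachable under Pre_
  else some (qi, avail)
termination_by (S - qi).toNat
decreasing_by omega

-- B's outer while loop over ni
def loopBouter (S : Int) (Q N : List Int) (ni qi avail v : Int) : Int :=
  if _h : ni < S then
    match PySem.List.pyGet? N ni with
    | some nv =>
        match loopBinner S Q nv qi avail with
        | some (qi', a') =>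
            if a' > 0 then loopBouter S Q N (ni + 1) qi' (a' - 1) (v + 1)
            else loopBouter S Q N (ni + 1) qi' a' v
        | none => v      -- IndexError in Python; unreachable under Pre_
    | none => v          -- IndexError in Python; unreachable under Pre_
  else v
termination_by (S - ni).toNat
decreasing_by all_goals omega

def number_battles_noglonia_win_in_war_alt (S : Int) (Q : List Int) (N : List Int) : Int :=
  loopBouter S (PySem.List.sorted Q (fun x => x) false) (PySem.List.sorted N (fun x => x) false) 0 0 0 0

-- ===== PRECONDITION & SPEC =====
-- Pre_ keeps S within both army lists' lengths: beyond that A raises IndexError on most inputs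
-- (it always reads N[0..S-1]) and returns only by accident of values on the rest, while B's
-- eager pool scan raises IndexError on some of them.
def Pre_number_battles_noglonia_win_in_war (S : Int) (Q : List Int) (N : List Int) : Prop :=
  S ≤ (Q.length : Int) ∧ S ≤ (N.length : Int)
instance (S : Int) (Q : List Int) (N : List Int) : Decidable (Pre_number_battles_noglonia_win_in_war S Q N) := by unfold Pre_number_battles_noglonia_win_in_war; infer_instance

def pvWitness_number_battles_noglonia_win_in_war : Int × List Int × List Int := (2, [1, 3], [2, 0])

def Spec_number_battles_noglonia_win_in_war (S : Int) (Q : List Int) (N : List Int) (out : Int) : Prop := out = number_battles_noglonia_win_in_war_alt S Q N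
instance (S : Int) (Q : List Int) (N : List Int) (out : Int) : Decidable (Spec_number_battles_noglonia_win_in_war S Q N out) := by unfold Spec_number_battles_noglonia_win_in_war; infer_instance

-- ===== CLAIM (what is proved, stated in full; the proofs are below) =====
def Claim_equal_number_battles_noglonia_win_in_war : Prop := ∀ (S : Int) (Q : List Int) (N : List Int), Dom_number_battles_noglonia_win_in_war S Q N → Pre_number_battles_noglonia_win_in_war S Q N → Spec_number_battles_noglonia_win_in_war S Q N (number_battles_noglonia_win_in_war S Q N)

-- ===== LEMMAS AND PROOFS =====

-- A's greedy as a list recursion (both lists ascending, weakest first)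
def aCount : List Int → List Int → Nat
  | _, [] => 0
  | [], _ => 0
  | q :: qs, x :: ns => if q < x then 1 + aCount qs ns else aCount (q :: qs) ns
termination_by _ ns => ns.length

-- B's pool greedy as a list recursion: a = size of the pool of already-passed weaker Quar armies
def bC : List Int → List Int → Nat → Nat
  | _, [], _ => 0
  | [], _ :: ns, a => if 0 < a then 1 + bC [] ns (a - 1) else bC [] ns a
  | q :: qs, n :: ns, a =>
      if q < n then bC qs (n :: ns) (a + 1)
      else if 0 < a then 1 + bC (q :: qs) ns (a - 1) else bC (q :: qs) ns a
termination_by qs ns _ => qs.length + ns.length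

@[simp] lemma aCount_nil_right (qs : List Int) : aCount qs [] = 0 := by cases qs <;> simp [aCount]
@[simp] lemma aCount_nil_left (ns : List Int) : aCount [] ns = 0 := by cases ns <;> simp [aCount]
@[simp] lemma bC_nil_right (qs : List Int) (a : Nat) : bC qs [] a = 0 := by cases qs <;> simp [bC]

-- the key equivalence: A's pair greedy on p ++ qs equals B's pool greedy on qs with pool p,
-- whenever every pooled army is weaker than every remaining Noglonia army (ns ascending)
lemma aCount_eq_bC : ∀ (ns qs p : List Int), ns.Pairwise (· ≤ ·) →
    (∀ x ∈ p, ∀ n ∈ ns, x < n) → aCount (p ++ qs) ns = bC qs ns p.length := by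
  intro ns
  induction ns with
  | nil => intro qs p _ _; simp
  | cons n ns ih =>
    intro qs
    induction qs with
    | nil =>
      intro p hs hp
      cases p with
      | nil =>
        simp only [List.append_nil, List.length_nil, aCount_nil_left, bC, lt_irrefl, if_false]
        have := ih [] [] (List.pairwise_cons.mp hs).2 (by simp)
        simpa using this
      | cons x p' =>
        have hx : x < n := hp x (by simp) n (by simp)
        simp only [List.append_nil, aCount, if_pos hx, bC, List.length_cons,
          Nat.succ_pos, if_true, Nat.add_sub_cancel]
        have := ih [] p' (List.pairwise_cons.mp hs).2
          (fun y hy m hm => hp y (by simp [hy]) m (by simp [hm]))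
        simpa using this
    | cons q qs' ihq =>
      intro p hs hp
      by_cases hqn : q < n
      · -- pour q into the pool
        have hstep : bC (q :: qs') (n :: ns) p.length = bC qs' (n :: ns) (p.length + 1) := by
          simp [bC, hqn]
        rw [hstep]
        have hp' : ∀ x ∈ p ++ [q], ∀ m ∈ n :: ns, x < m := by
          intro x hx m hm
          rcases List.mem_append.mp hx with h | h
          · exact hp x h m hm
          · have : x = q := by simpa using h
            subst this
            rcases List.mem_cons.mp hm with rfl | hm'
            · exact hqn
            · exact lt_of_lt_of_le hqn ((List.pairwise_cons.mp hs).1 m hm')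
        have := ihq (p ++ [q]) hs hp'
        simpa [List.append_assoc] using this
      · cases p with
        | nil =>
          simp only [List.nil_append, aCount, if_neg hqn, bC, List.length_nil, lt_irrefl,
            if_false]
          exact ih (q :: qs') [] (List.pairwise_cons.mp hs).2 (by simp)
        | cons x p' =>
          have hx : x < n := hp x (by simp) n (by simp)
          simp only [List.cons_append, aCount, if_pos hx, bC, if_neg hqn, List.length_cons,
            if_pos (Nat.succ_pos _), Nat.add_sub_cancel]
          have := ih (q :: qs') p' (List.pairwise_cons.mp hs).2
            (fun y hy m hm => hp y (by simp [hy]) m (by simp [hm]))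
          simpa using this

-- A's index loop computes aCount on the remaining slices of the first S elements
lemma loopA_eq (S : Int) (Q N : List Int) (hQ : S ≤ (Q.length : Int)) (hN : S ≤ (N.length : Int)) :
    ∀ (k : Nat) (ni qi v : Int), (S - ni).toNat = k → 0 ≤ ni → 0 ≤ qi →
      loopA S Q N ni qi v = v + aCount ((Q.take S.toNat).drop qi.toNat) ((N.take S.toNat).drop ni.toNat) := by
  intro k
  induction k with
  | zero =>
    intro ni qi v hk hni hqi
    rw [loopA, dif_neg (show ¬(ni < S ∧ qi < S) by omega)]
    rw [List.drop_eq_nil_of_le (as := N.take S.toNat) (by rw [List.length_take]; omega)]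
    simp
  | succ k ih =>
    intro ni qi v hk hni hqi
    by_cases hlt : ni < S ∧ qi < S
    · have hniN : ni.toNat < N.length := by omega
      have hqiQ : qi.toNat < Q.length := by omega
      have hgn : PySem.List.pyGet? N ni = some N[ni.toNat] :=
        PySem.List.pyGet?_eq_some_getElem N hni (by omega)
      have hgq : PySem.List.pyGet? Q qi = some Q[qi.toNat] :=
        PySem.List.pyGet?_eq_some_getElem Q hqi (by omega)
      have hdq : (Q.take S.toNat).drop qi.toNat
          = Q[qi.toNat] :: (Q.take S.toNat).drop (qi.toNat + 1) := by
        rw [List.drop_eq_getElem_cons (by simp; omega)]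
        simp [List.getElem_take]
      have hdn : (N.take S.toNat).drop ni.toNat
          = N[ni.toNat] :: (N.take S.toNat).drop (ni.toNat + 1) := by
        rw [List.drop_eq_getElem_cons (by simp; omega)]
        simp [List.getElem_take]
      rw [loopA, dif_pos hlt, hgn, hgq]
      by_cases hw : N[ni.toNat] > Q[qi.toNat]
      · simp only [if_pos hw]
        rw [ih (ni + 1) (qi + 1) (v + 1) (by omega) (by omega) (by omega)]
        rw [hdq, hdn]
        have e1 : (qi + 1).toNat = qi.toNat + 1 := by omega
        have e2 : (ni + 1).toNat = ni.toNat + 1 := by omega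
        rw [e1, e2]; simp only [aCount]; rw [if_pos hw]
        push_cast; ring
      · simp only [if_neg hw]
        rw [ih (ni + 1) qi v (by omega) (by omega) hqi]
        rw [hdn]
        have e2 : (ni + 1).toNat = ni.toNat + 1 := by omega
        rw [e2, hdq]; simp only [aCount]; rw [if_neg hw]
    · rw [loopA, dif_neg hlt]
      have : ni.toNat ≥ S.toNat ∨ qi.toNat ≥ S.toNat := by omega
      rcases this with h' | h'
      · rw [List.drop_eq_nil_of_le (as := N.take S.toNat) (by rw [List.length_take]; omega)]; simp
      · rw [List.drop_eq_nil_of_le (as := Q.take S.toNat) (by rw [List.length_take]; omega)]; simp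

-- B's inner loop performed on the sliced lists: it returns, and one whole outer-loop step
-- of bC on the old slice equals bC's non-pouring step at the stopping point
lemma loopBinner_eq (S : Int) (Q : List Int) (hQ : S ≤ (Q.length : Int)) (nv : Int) (ns : List Int) :
    ∀ (k : Nat) (qi avail : Int), (S - qi).toNat = k → 0 ≤ qi → 0 ≤ avail →
      ∃ qi' a', loopBinner S Q nv qi avail = some (qi', a') ∧ 0 ≤ qi' ∧ 0 ≤ a' ∧
        bC ((Q.take S.toNat).drop qi.toNat) (nv :: ns) avail.toNat
          = (if 0 < a'.toNat then 1 + bC ((Q.take S.toNat).drop qi'.toNat) ns (a'.toNat - 1)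
             else bC ((Q.take S.toNat).drop qi'.toNat) ns a'.toNat) := by
  intro k
  induction k with
  | zero =>
    intro qi avail hk hqi ha
    refine ⟨qi, avail, ?_, hqi, ha, ?_⟩
    · rw [loopBinner, dif_neg (by omega)]
    · rw [List.drop_eq_nil_of_le (as := Q.take S.toNat) (by rw [List.length_take]; omega)]
      simp [bC]
  | succ k ih =>
    intro qi avail hk hqi ha
    by_cases hlt : qi < S
    · have hqiQ : qi.toNat < Q.length := by omega
      have hgq : PySem.List.pyGet? Q qi = some Q[qi.toNat] :=
        PySem.List.pyGet?_eq_some_getElem Q hqi (by omega)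
      have hdq : (Q.take S.toNat).drop qi.toNat
          = Q[qi.toNat] :: (Q.take S.toNat).drop (qi.toNat + 1) := by
        rw [List.drop_eq_getElem_cons (by simp; omega)]
        simp [List.getElem_take]
      by_cases hw : Q[qi.toNat] < nv
      · obtain ⟨qi', a', hrun, h1, h2, h3⟩ := ih (qi + 1) (avail + 1) (by omega) (by omega) (by omega)
        refine ⟨qi', a', ?_, h1, h2, ?_⟩
        · rw [loopBinner, dif_pos hlt, hgq]; simp only [if_pos hw]; exact hrun
        · rw [hdq]
          have e1 : (qi + 1).toNat = qi.toNat + 1 := by omega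
          have e2 : (avail + 1).toNat = avail.toNat + 1 := by omega
          simp only [bC, if_pos hw]
          rw [← e2, ← e1, h3]
      · refine ⟨qi, avail, ?_, hqi, ha, ?_⟩
        · rw [loopBinner, dif_pos hlt, hgq]; simp only [if_neg hw]
        · rw [hdq]; simp only [bC, if_neg hw]
    · refine ⟨qi, avail, ?_, hqi, ha, ?_⟩
      · rw [loopBinner, dif_neg (by omega)]
      · rw [List.drop_eq_nil_of_le (as := Q.take S.toNat) (by rw [List.length_take]; omega)]
        simp [bC]

-- B's outer loop computes bC on the remaining slices with the pool counter
lemma loopBouter_eq (S : Int) (Q N : List Int) (hQ : S ≤ (Q.length : Int)) (hN : S ≤ (N.length : Int)) :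
    ∀ (k : Nat) (ni qi avail v : Int), (S - ni).toNat = k → 0 ≤ ni → 0 ≤ qi → 0 ≤ avail →
      loopBouter S Q N ni qi avail v
        = v + bC ((Q.take S.toNat).drop qi.toNat) ((N.take S.toNat).drop ni.toNat) avail.toNat := by
  intro k
  induction k with
  | zero =>
    intro ni qi avail v hk hni hqi ha
    rw [loopBouter, dif_neg (by omega)]
    rw [List.drop_eq_nil_of_le (as := N.take S.toNat) (by rw [List.length_take]; omega)]
    simp
  | succ k ih =>
    intro ni qi avail v hk hni hqi ha
    by_cases hlt : ni < S
    · have hniN : ni.toNat < N.length := by omega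
      have hgn : PySem.List.pyGet? N ni = some N[ni.toNat] :=
        PySem.List.pyGet?_eq_some_getElem N hni (by omega)
      have hdn : (N.take S.toNat).drop ni.toNat
          = N[ni.toNat] :: (N.take S.toNat).drop (ni.toNat + 1) := by
        rw [List.drop_eq_getElem_cons (by simp; omega)]
        simp [List.getElem_take]
      obtain ⟨qi', a', hrun, h1, h2, h3⟩ :=
        loopBinner_eq S Q hQ N[ni.toNat] ((N.take S.toNat).drop (ni.toNat + 1))
          (S - qi).toNat qi avail rfl hqi ha
      rw [loopBouter, dif_pos hlt]
      simp only [hgn, hrun]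
      rw [hdn]
      by_cases hpos : a' > 0
      · simp only [if_pos hpos]
        rw [ih (ni + 1) qi' (a' - 1) (v + 1) (by omega) (by omega) h1 (by omega)]
        have e1 : (ni + 1).toNat = ni.toNat + 1 := by omega
        have e2 : (a' - 1).toNat = a'.toNat - 1 := by omega
        rw [e1, e2, h3, if_pos (by omega : 0 < a'.toNat)]
        push_cast; ring
      · simp only [if_neg hpos]
        rw [ih (ni + 1) qi' a' v (by omega) (by omega) h1 h2]
        have e1 : (ni + 1).toNat = ni.toNat + 1 := by omega
        rw [e1, h3, if_neg (by omega : ¬ 0 < a'.toNat)]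
    · rw [loopBouter, dif_neg hlt]
      rw [List.drop_eq_nil_of_le (as := N.take S.toNat) (by rw [List.length_take]; omega)]
      simp

-- ===== VERDICT (by name: the statement is the Claim_ definition above) =====
theorem number_battles_noglonia_win_in_war_spec : Claim_equal_number_battles_noglonia_win_in_war := by
  intro S Q N _ hpre
  obtain ⟨hQ, hN⟩ := hpre
  unfold Spec_number_battles_noglonia_win_in_war
  unfold number_battles_noglonia_win_in_war number_battles_noglonia_win_in_war_alt
  set qs := PySem.List.sorted Q (fun x => x) false with hqs
  set ns := PySem.List.sorted N (fun x => x) false with hns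
  have hlq : (qs.length : Int) = (Q.length : Int) := by rw [hqs, PySem.List.length_sorted]
  have hln : (ns.length : Int) = (N.length : Int) := by rw [hns, PySem.List.length_sorted]
  have hQ' : S ≤ (qs.length : Int) := by omega
  have hN' : S ≤ (ns.length : Int) := by omega
  rw [loopA_eq S qs ns hQ' hN' (S - 0).toNat 0 0 0 rfl le_rfl le_rfl]
  rw [loopBouter_eq S qs ns hQ' hN' (S - 0).toNat 0 0 0 0 rfl le_rfl le_rfl le_rfl]
  simp only [Int.toNat_zero, List.drop_zero, zero_add]
  have hn : (ns.take S.toNat).Pairwise (· ≤ ·) :=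
    List.Pairwise.sublist (List.take_sublist _ _) (by simpa using PySem.List.sorted_pairwise N (fun x => x))
  have := aCount_eq_bC (ns.take S.toNat) (qs.take S.toNat) [] hn (by simp)
  simpa using this
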